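-- pv_equiv track=rewrite | github.com/lumatic2/agent-orchestration | pipeline/stages/s16_pdf.py | _markdown_to_typst
-- ===== SOURCE A (Python) =====
-- def _markdown_to_typst(markdown_body: str) -> str:
--     out: list[str] = []
--     for line in markdown_body.splitlines():
--         if line.startswith("### "):
--             out.append(f"=== {line[4:].strip()}")
--         elif line.startswith("## "):
--             out.append(f"== {line[3:].strip()}")
--         elif line.startswith("# "):
--             out.append(f"= {line[2:].strip()}")
--         else:
--             out.append(line)
--     return "\n".join(out).strip()
-- ===== SOURCE B (Python) =====
-- def _convert_line(line: str) -> str: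
--     level = 0
--     while level < len(line) and line[level] == '#':
--         level += 1
--     if 1 <= level <= 3 and level < len(line) and line[level] == ' ':
--         return '=' * level + ' ' + line[level + 1:].strip()
--     return line
--
--
-- def _markdown_to_typst(markdown_body: str) -> str:
--     return '\n'.join(_convert_line(line) for line in markdown_body.splitlines()).strip()
-- ===== Notes on version B (the rewrite author's own statement) =====
-- stated objective: idiomatic
-- what changed: Replaces the three hard-coded heading-prefix tests by one generic rule: count the leading hash characters and, if the count is 1-3 and a space follows, emit that many equals signs before the stripped title; the append loop becomes a per-line helper joined over a generator.
import Mathlib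
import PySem

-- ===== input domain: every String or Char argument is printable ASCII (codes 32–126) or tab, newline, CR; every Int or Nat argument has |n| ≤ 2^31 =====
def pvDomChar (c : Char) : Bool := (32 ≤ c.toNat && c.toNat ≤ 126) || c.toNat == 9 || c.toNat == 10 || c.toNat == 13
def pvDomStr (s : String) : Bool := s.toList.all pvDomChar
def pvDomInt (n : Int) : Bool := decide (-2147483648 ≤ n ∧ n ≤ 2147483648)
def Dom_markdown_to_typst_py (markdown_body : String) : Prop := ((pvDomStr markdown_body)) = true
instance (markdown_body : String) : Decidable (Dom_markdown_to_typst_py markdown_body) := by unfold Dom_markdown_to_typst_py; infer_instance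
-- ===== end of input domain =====

-- ===== PORT A =====
-- B replaces the three literal prefix tests by a generic leading-'#' count; objective: idiomatic.
def pvLineA (line : List Char) : List Char :=
  if PySem.Chars.startswith line ("### ".toList) then
    "=== ".toList ++ PySem.Chars.strip (PySem.List.slice line (some 4) none)
  else if PySem.Chars.startswith line ("## ".toList) then
    "== ".toList ++ PySem.Chars.strip (PySem.List.slice line (some 3) none)
  else if PySem.Chars.startswith line ("# ".toList) then
    "= ".toList ++ PySem.Chars.strip (PySem.List.slice line (some 2) none)
  else line

def markdown_to_typst_py (markdown_body : String) : String :=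
  let out := (PySem.Chars.splitlines markdown_body.toList).foldl
    (fun acc line => acc ++ [pvLineA line]) []
  String.ofList (PySem.Chars.strip (PySem.Chars.join ['\n'] out))

-- ===== PORT B =====
-- while level < len(line) and line[level] == '#': level += 1   (consumes the line from the front)
def pvCountHash : List Char → Nat
  | [] => 0
  | c :: rest => if c == '#' then pvCountHash rest + 1 else 0

def pvLineB (line : List Char) : List Char :=
  let level := pvCountHash line
  if 1 ≤ level ∧ level ≤ 3 ∧ level < line.length ∧
      PySem.List.pyGet? line (level : Int) = some ' ' then
    List.replicate level '=' ++ [' '] ++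
      PySem.Chars.strip (PySem.List.slice line (some ((level : Int) + 1)) none)
  else line

def markdown_to_typst_py_alt (markdown_body : String) : String :=
  String.ofList (PySem.Chars.strip (PySem.Chars.join ['\n']
    ((PySem.Chars.splitlines markdown_body.toList).map pvLineB)))

-- ===== PRECONDITION & SPEC =====
def Spec_markdown_to_typst_py (markdown_body : String) (out : String) : Prop := out = markdown_to_typst_py_alt markdown_body
instance (markdown_body : String) (out : String) : Decidable (Spec_markdown_to_typst_py markdown_body out) := by unfold Spec_markdown_to_typst_py; infer_instance

-- ===== CLAIM (what is proved, stated in full; the proofs are below) =====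
def Claim_equal_markdown_to_typst_py : Prop := ∀ (markdown_body : String), Dom_markdown_to_typst_py markdown_body → Spec_markdown_to_typst_py markdown_body (markdown_to_typst_py markdown_body)

-- ===== LEMMAS AND PROOFS =====
theorem pvSlice_from_nat (l : List Char) (n : Nat) :
    PySem.List.slice l (some (n : Int)) none = l.drop n := by
  rw [PySem.List.slice_from l (by positivity)]; simp

theorem pvLine_eq (line : List Char) : pvLineA line = pvLineB line := by
  rcases line with _ | ⟨c0, r0⟩
  · decide
  by_cases h0 : c0 = '#'
  · subst h0
    rcases r0 with _ | ⟨c1, r1⟩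
    · decide
    by_cases h1 : c1 = '#'
    · subst h1
      rcases r1 with _ | ⟨c2, r2⟩
      · decide
      by_cases h2 : c2 = '#'
      · subst h2
        rcases r2 with _ | ⟨c3, r3⟩
        · decide
        by_cases h3 : c3 = '#'
        · subst h3
          -- four or more leading '#': both sides pass the line through
          have hc : pvCountHash ('#'::'#'::'#'::'#'::r3) = pvCountHash r3 + 4 := by
            simp [pvCountHash]
          simp only [pvLineA, pvLineB, PySem.Chars.startswith, hc]
          rw [if_neg (by simp [List.isPrefixOf]), if_neg (by simp [List.isPrefixOf]),
            if_neg (by simp [List.isPrefixOf]), if_neg (by rintro ⟨-, h, -⟩; omega)]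
        · by_cases h3' : c3 = ' '
          · subst h3'
            -- "### x" heading
            have hc : pvCountHash ('#'::'#'::'#'::' '::r3) = 3 := by
              simp [pvCountHash]
            simp only [pvLineA, pvLineB, PySem.Chars.startswith, hc]
            rw [if_pos (by simp [List.isPrefixOf]), if_pos ?hcnd]
            case hcnd =>
              refine ⟨by omega, by omega, by simp, ?_⟩
              rw [PySem.List.pyGet?_natCast]; rfl
            rw [show ((3:Nat):Int) + 1 = ((4:Nat):Int) by norm_num, pvSlice_from_nat,
              show (4:Int) = ((4:Nat):Int) by norm_num, pvSlice_from_nat]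
            simp [List.replicate]
          · -- "###x": no heading on either side
            have hc : pvCountHash ('#'::'#'::'#'::c3::r3) = 3 := by
              simp [pvCountHash, h3]
            simp only [pvLineA, pvLineB, PySem.Chars.startswith, hc]
            rw [if_neg ?hA1, if_neg ?hA2, if_neg ?hA3, if_neg ?hB]
            case hA1 => simp [List.isPrefixOf]; simp [Ne.symm h3']
            case hA2 => simp [List.isPrefixOf]
            case hA3 => simp [List.isPrefixOf]
            case hB =>
              rintro ⟨-, -, -, h⟩
              rw [PySem.List.pyGet?_natCast] at h
              simp at h
              exact h3' h
      · by_cases h2' : c2 = ' '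
        · subst h2'
          -- "## x" heading
          have hc : pvCountHash ('#'::'#'::' '::r2) = 2 := by simp [pvCountHash]
          simp only [pvLineA, pvLineB, PySem.Chars.startswith, hc]
          rw [if_neg (by simp [List.isPrefixOf]), if_pos (by simp [List.isPrefixOf]),
            if_pos ?hcnd]
          case hcnd =>
            refine ⟨by omega, by omega, by simp, ?_⟩
            rw [PySem.List.pyGet?_natCast]; rfl
          rw [show ((2:Nat):Int) + 1 = ((3:Nat):Int) by norm_num, pvSlice_from_nat,
            show (3:Int) = ((3:Nat):Int) by norm_num, pvSlice_from_nat]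
          simp [List.replicate]
        · have hc : pvCountHash ('#'::'#'::c2::r2) = 2 := by simp [pvCountHash, h2]
          simp only [pvLineA, pvLineB, PySem.Chars.startswith, hc]
          rw [if_neg ?hA1, if_neg ?hA2, if_neg ?hA3, if_neg ?hB]
          case hA1 => simp [List.isPrefixOf]; simp [Ne.symm h2]
          case hA2 => simp [List.isPrefixOf]; simp [Ne.symm h2']
          case hA3 => simp [List.isPrefixOf]
          case hB =>
            rintro ⟨-, -, -, h⟩
            rw [PySem.List.pyGet?_natCast] at h
            simp at h
            exact h2' h
    · by_cases h1' : c1 = ' '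
      · subst h1'
        -- "# x" heading
        have hc : pvCountHash ('#'::' '::r1) = 1 := by simp [pvCountHash]
        simp only [pvLineA, pvLineB, PySem.Chars.startswith, hc]
        rw [if_neg (by simp [List.isPrefixOf]), if_neg (by simp [List.isPrefixOf]),
          if_pos (by simp [List.isPrefixOf]), if_pos ?hcnd]
        case hcnd =>
          refine ⟨by omega, by omega, by simp, ?_⟩
          rw [PySem.List.pyGet?_natCast]; rfl
        rw [show ((1:Nat):Int) + 1 = ((2:Nat):Int) by norm_num, pvSlice_from_nat,
          show (2:Int) = ((2:Nat):Int) by norm_num, pvSlice_from_nat]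
        simp [List.replicate]
      · have hc : pvCountHash ('#'::c1::r1) = 1 := by simp [pvCountHash, h1]
        simp only [pvLineA, pvLineB, PySem.Chars.startswith, hc]
        rw [if_neg ?hA1, if_neg ?hA2, if_neg ?hA3, if_neg ?hB]
        case hA1 => simp [List.isPrefixOf]; simp [Ne.symm h1]
        case hA2 => simp [List.isPrefixOf]; simp [Ne.symm h1]
        case hA3 => simp [List.isPrefixOf]; simp [Ne.symm h1']
        case hB =>
          rintro ⟨-, -, -, h⟩
          rw [PySem.List.pyGet?_natCast] at h
          simp at h
          exact h1' h
  · -- first char not '#': both sides pass the line through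
    simp [pvLineA, pvLineB, pvCountHash, PySem.Chars.startswith, List.isPrefixOf,
      h0, Ne.symm h0]

theorem pvFoldl_append_map {α β : Type} (f : α → β) (l : List α) (acc : List β) :
    l.foldl (fun acc line => acc ++ [f line]) acc = acc ++ l.map f := by
  induction l generalizing acc with
  | nil => simp
  | cons x xs ih => simp [List.foldl, ih]

-- ===== VERDICT (by name: the statement is the Claim_ definition above) =====
theorem markdown_to_typst_py_spec : Claim_equal_markdown_to_typst_py := by
  intro s _
  unfold Spec_markdown_to_typst_py markdown_to_typst_py markdown_to_typst_py_alt
  simp only [pvFoldl_append_map, List.nil_append]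
  rw [List.map_congr_left fun l _ => pvLine_eq l]
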